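-- pv_equiv track=rewrite | github.com/HrtBridge/vibeathon-repo | state_engine/engine.py | _pick_id_field_by_overlap
-- ===== SOURCE A (Python) =====
-- from typing import Dict, List, Optional, Set, Tuple
--
-- def _candidate_id_fields(rows: List[dict]) -> List[str]:
--     if not rows:
--         return []
--     keys = list(rows[0].keys())
--     # Strong candidates first
--     preferred = []
--     for k in keys:
--         lk = k.lower().strip()
--         if lk in ("unique id", "unique_id", "_id", "id", "uid"):
--             preferred.append(k)
--     # Then anything containing id
--     for k in keys:
--         if k not in preferred and "id" in k.lower():
--             preferred.append(k)
--     # Finally, all keys as a last resort (keeps function total)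
--     for k in keys:
--         if k not in preferred:
--             preferred.append(k)
--     return preferred
--
-- def _pick_id_field_by_overlap(rows: List[dict], reference_ids: Set[str]) -> Optional[str]:
--     """
--     Pick the column whose values overlap most with reference_ids.
--     This is the key to making Bubble linked fields joinable.
--     """
--     if not rows:
--         return None
--     candidates = _candidate_id_fields(rows)
--     best: Tuple[int, int, str] = (-1, -1, candidates[0])  # (overlap, nonempty_count, field)
--     for field in candidates:
--         vals = [(r.get(field) or "").strip() for r in rows]
--         nonempty = [v for v in vals if v]
--         overlap = sum(1 for v in nonempty if v in reference_ids)
--         score = (overlap, len(nonempty), field)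
--         if score > best:
--             best = score
--     return best[2]
-- ===== SOURCE B (Python) =====
-- from typing import Dict, List, Optional, Set, Tuple
--
-- def _candidate_id_fields(rows: List[dict]) -> List[str]:
--     if not rows:
--         return []
--     keys = list(rows[0].keys())
--     preferred = []
--     for k in keys:
--         lk = k.lower().strip()
--         if lk in ("unique id", "unique_id", "_id", "id", "uid"):
--             preferred.append(k)
--     for k in keys:
--         if k not in preferred and "id" in k.lower():
--             preferred.append(k)
--     for k in keys:
--         if k not in preferred:
--             preferred.append(k)
--     return preferred
--
-- def _pick_id_field_by_overlap(rows: List[dict], reference_ids: Set[str]) -> Optional[str]: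
--     if not rows:
--         return None
--     candidates = _candidate_id_fields(rows)
--     overlap = {f: 0 for f in candidates}
--     nonempty = {f: 0 for f in candidates}
--     for r in rows:
--         for f in candidates:
--             v = (r.get(f) or "").strip()
--             if v:
--                 nonempty[f] += 1
--                 if v in reference_ids:
--                     overlap[f] += 1
--     return max(candidates, key=lambda f: (overlap[f], nonempty[f], f))
-- ===== Notes on version B (the rewrite author's own statement) =====
-- stated objective: alternative
-- what changed: B replaces A's column-major scans (building vals/nonempty lists over all rows once per candidate field) by a single row-major sweep that accumulates per-field overlap and nonempty counters in two dicts, then picks the max candidate under the same (overlap, nonempty, field) key.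
-- outside the precondition, e.g. on _pick_id_field_by_overlap([{}], set()): A raises IndexError, B raises ValueError
import Mathlib
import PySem

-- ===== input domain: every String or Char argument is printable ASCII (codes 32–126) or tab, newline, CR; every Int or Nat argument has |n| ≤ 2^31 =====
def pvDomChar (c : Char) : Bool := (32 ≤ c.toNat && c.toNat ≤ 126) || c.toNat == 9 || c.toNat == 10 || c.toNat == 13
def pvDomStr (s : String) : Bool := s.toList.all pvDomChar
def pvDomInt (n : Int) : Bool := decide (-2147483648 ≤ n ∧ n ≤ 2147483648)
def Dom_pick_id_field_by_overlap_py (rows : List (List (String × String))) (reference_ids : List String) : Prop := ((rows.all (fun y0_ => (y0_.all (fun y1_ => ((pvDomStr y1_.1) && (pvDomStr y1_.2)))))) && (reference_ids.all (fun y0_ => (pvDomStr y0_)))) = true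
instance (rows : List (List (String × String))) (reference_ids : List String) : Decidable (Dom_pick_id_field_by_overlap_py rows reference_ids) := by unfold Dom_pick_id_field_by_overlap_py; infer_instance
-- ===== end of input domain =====

-- B replaces A's column-major rescans (one pass over all rows per candidate field) by one
-- row-major sweep that accumulates per-field overlap/nonempty counters in two dicts, then
-- takes the max of the candidates under the same (overlap, nonempty, field) key (alternative).

-- Python's `>` on an (int, int, str) triple: strict lexicographic comparison (A's score tuples)
def pvTripleGt (a b : Int × Int × String) : Bool :=
  decide (b.1 < a.1) ||
    (decide (a.1 = b.1) &&
      (decide (b.2.1 < a.2.1) || (decide (a.2.1 = b.2.1) && decide (b.2.2 < a.2.2))))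

-- module helper `_candidate_id_fields` (A's copy)
def pvCandidateIdFields (rows : List (List (String × String))) : List String :=
  match rows with
  | [] => []
  | r :: _ =>
    let keys := (PySem.Dict.mk r).keys
    let p1 := keys.foldl (fun acc k =>
      let lk := PySem.Str.strip (PySem.Str.lower k)
      if lk = "unique id" ∨ lk = "unique_id" ∨ lk = "_id" ∨ lk = "id" ∨ lk = "uid" then
        acc ++ [k] else acc) []
    let p2 := keys.foldl (fun acc k =>
      if acc.contains k = false ∧ PySem.Str.isIn "id" (PySem.Str.lower k) = true then
        acc ++ [k] else acc) p1
    keys.foldl (fun acc k => if acc.contains k = false then acc ++ [k] else acc) p2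

-- ===== PORT A =====
def pick_id_field_by_overlap_py (rows : List (List (String × String))) (reference_ids : List String) : Option String :=
  match rows with
  | [] => none
  | _ =>
    let candidates := pvCandidateIdFields rows
    match PySem.List.pyGet? candidates 0 with
    | none => none   -- candidates[0] raises IndexError in Python; excluded by Pre_
    | some c0 =>
      let best := candidates.foldl (fun best field =>
        let vals := rows.map (fun r => PySem.Str.strip (((PySem.Dict.mk r).get? field).getD ""))
        let nonempty := vals.filter (fun v => v != "")
        let overlap : Int := ((nonempty.filter (fun v => reference_ids.contains v)).length : Int)
        let score : Int × Int × String := (overlap, (nonempty.length : Int), field)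
        if pvTripleGt score best then score else best) ((-1 : Int), (-1 : Int), c0)
      some best.2.2

-- ===== PORT B =====
-- B's hand-port of Python's tuple `>` used by max(key=...): nested comparisons
def pvKeyGtB (a b : Int × Int × String) : Bool :=
  if a.1 = b.1 then
    (if a.2.1 = b.2.1 then decide (b.2.2 < a.2.2) else decide (b.2.1 < a.2.1))
  else decide (b.1 < a.1)

def pick_id_field_by_overlap_py_alt (rows : List (List (String × String))) (reference_ids : List String) : Option String :=
  if rows.isEmpty then none
  else
    -- _candidate_id_fields(rows), inlined (same module helper as in A's Python)
    let candidates :=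
      match rows with
      | [] => []
      | r :: _ =>
        let keys := (PySem.Dict.mk r).keys
        let p1 := keys.foldl (fun acc k =>
          let lk := PySem.Str.strip (PySem.Str.lower k)
          if lk = "unique id" ∨ lk = "unique_id" ∨ lk = "_id" ∨ lk = "id" ∨ lk = "uid" then
            acc ++ [k] else acc) []
        let p2 := keys.foldl (fun acc k =>
          if acc.contains k = false ∧ PySem.Str.isIn "id" (PySem.Str.lower k) = true then
            acc ++ [k] else acc) p1
        keys.foldl (fun acc k => if acc.contains k = false then acc ++ [k] else acc) p2
    let ov0 : PySem.Dict String Int := candidates.foldl (fun d f => d.insert f 0) PySem.Dict.empty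
    let ne0 : PySem.Dict String Int := candidates.foldl (fun d f => d.insert f 0) PySem.Dict.empty
    let counts := rows.foldl (fun (p : PySem.Dict String Int × PySem.Dict String Int) r =>
      candidates.foldl (fun (q : PySem.Dict String Int × PySem.Dict String Int) f =>
        let v := PySem.Str.strip (((PySem.Dict.mk r).get? f).getD "")
        if v != "" then
          let q2 := (q.1, q.2.modify f 0 (· + 1))
          if reference_ids.contains v then (q2.1.modify f 0 (· + 1), q2.2) else q2
        else q) p) (ov0, ne0)
    -- max(candidates, key=lambda f: (overlap[f], nonempty[f], f)) ported by hand (exact):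
    -- Python's max keeps the first element whose key triple is lexicographically maximal,
    -- i.e. a left fold replacing the best only on strictly greater key; empty → ValueError.
    match candidates with
    | [] => none
    | c0 :: rest =>
      some (rest.foldl (fun best f =>
        if pvKeyGtB (counts.1.getD f 0, counts.2.getD f 0, f)
                      (counts.1.getD best 0, counts.2.getD best 0, best)
        then f else best) c0)

-- ===== PRECONDITION & SPEC =====
-- Pre_ excludes (a) association lists in which some row repeats a key — those do not represent a
-- Python dict (our first-match lookup cannot match dict construction's last-wins collapse) — and
-- (b) a nonempty rows whose first row is the empty dict, where A raises IndexError on candidates[0]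
-- (and B's max(...) raises ValueError).
def Pre_pick_id_field_by_overlap_py (rows : List (List (String × String))) (reference_ids : List String) : Prop :=
  (∀ r ∈ rows, (r.map Prod.fst).Nodup) ∧ (∀ r ∈ rows.take 1, r ≠ [])
instance (rows : List (List (String × String))) (reference_ids : List String) : Decidable (Pre_pick_id_field_by_overlap_py rows reference_ids) := by unfold Pre_pick_id_field_by_overlap_py; infer_instance

def pvWitness_pick_id_field_by_overlap_py : (List (List (String × String))) × List String :=
  ([[("id", "a"), ("name", "x")], [("id", "b"), ("name", "")]], ["a", "b"])

def Spec_pick_id_field_by_overlap_py (rows : List (List (String × String))) (reference_ids : List String) (out : Option String) : Prop := out = pick_id_field_by_overlap_py_alt rows reference_ids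
instance (rows : List (List (String × String))) (reference_ids : List String) (out : Option String) : Decidable (Spec_pick_id_field_by_overlap_py rows reference_ids out) := by unfold Spec_pick_id_field_by_overlap_py; infer_instance

-- ===== CLAIM (what is proved, stated in full; the proofs are below) =====
def Claim_equal_pick_id_field_by_overlap_py : Prop := ∀ (rows : List (List (String × String))) (reference_ids : List String), Dom_pick_id_field_by_overlap_py rows reference_ids → Pre_pick_id_field_by_overlap_py rows reference_ids → Spec_pick_id_field_by_overlap_py rows reference_ids (pick_id_field_by_overlap_py rows reference_ids)

-- ===== LEMMAS AND PROOFS =====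

def pvVal (r : List (String × String)) (f : String) : String :=
  PySem.Str.strip (((PySem.Dict.mk r).get? f).getD "")

def pvInner (refs : List String) (r : List (String × String))
    (q : PySem.Dict String Int × PySem.Dict String Int) (f : String) :
    PySem.Dict String Int × PySem.Dict String Int :=
  let v := PySem.Str.strip (((PySem.Dict.mk r).get? f).getD "")
  if v != "" then
    let q2 := (q.1, q.2.modify f 0 (· + 1))
    if refs.contains v then (q2.1.modify f 0 (· + 1), q2.2) else q2
  else q

lemma pv_inner_one (refs : List String) (r : List (String × String)) (q) (f g : String) :
    ((pvInner refs r q g).1.getD f 0, (pvInner refs r q g).2.getD f 0)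
    = if f = g then
        (q.1.getD f 0 + (if pvVal r g != "" ∧ refs.contains (pvVal r g) = true then 1 else 0),
         q.2.getD f 0 + (if pvVal r g != "" then 1 else 0))
      else (q.1.getD f 0, q.2.getD f 0) := by
  unfold pvInner pvVal
  by_cases hv : PySem.Str.strip (((PySem.Dict.mk r).get? g).getD "") != ""
  · by_cases hm : refs.contains (PySem.Str.strip (((PySem.Dict.mk r).get? g).getD "")) = true
    · have hm' : PySem.Str.strip (((PySem.Dict.mk r).get? g).getD "") ∈ refs := by
        simpa using hm
      simp [hv, hm']
      rw [PySem.Dict.getD_modify, PySem.Dict.getD_modify]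
      rcases eq_or_ne f g with h | h <;> simp [h]
    · have hm' : PySem.Str.strip (((PySem.Dict.mk r).get? g).getD "") ∉ refs := by
        simpa using hm
      simp [hv, hm']
      rw [PySem.Dict.getD_modify]
      rcases eq_or_ne f g with h | h <;> simp [h]
  · simp at hv
    simp [hv]

def pvScore (refs : List String) (rows : List (List (String × String))) (f : String) : Int × Int × String :=
  ((((rows.map (fun r => pvVal r f)).filter (fun v => v != "")).filter
      (fun v => refs.contains v)).length,
   (((rows.map (fun r => pvVal r f)).filter (fun v => v != "")).length : Int), f)

lemma pv_inner_fold (refs : List String) (r : List (String × String)) :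
    ∀ (cands : List String) (q : PySem.Dict String Int × PySem.Dict String Int) (f : String),
      cands.Nodup →
    ((cands.foldl (pvInner refs r) q).1.getD f 0, (cands.foldl (pvInner refs r) q).2.getD f 0)
    = if f ∈ cands then
        (q.1.getD f 0 + (if pvVal r f != "" ∧ refs.contains (pvVal r f) = true then 1 else 0),
         q.2.getD f 0 + (if pvVal r f != "" then 1 else 0))
      else (q.1.getD f 0, q.2.getD f 0) := by
  intro cands
  induction cands with
  | nil => intro q f _; simp
  | cons c t ih =>
    intro q f hnd
    have hnd' := hnd.of_cons
    have hct : c ∉ t := (List.nodup_cons.mp hnd).1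
    simp only [List.foldl_cons]
    have hone := pv_inner_one refs r q f c
    have h1 : (pvInner refs r q c).1.getD f 0 =
        (if f = c then q.1.getD f 0 + (if pvVal r c != "" ∧ refs.contains (pvVal r c) = true then 1 else 0) else q.1.getD f 0) := by
      rcases eq_or_ne f c with h | h <;> simp [h] at hone ⊢ <;> simp [hone.1]
    have h2 : (pvInner refs r q c).2.getD f 0 =
        (if f = c then q.2.getD f 0 + (if pvVal r c != "" then 1 else 0) else q.2.getD f 0) := by
      rcases eq_or_ne f c with h | h <;> simp [h] at hone ⊢ <;> simp [hone.2]
    rw [ih _ f hnd']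
    rcases eq_or_ne f c with h | h
    · subst h
      simp [hct, h1, h2]
    · simp [h, h1, h2]

lemma pvScore_cons (refs : List String) (r : List (String × String))
    (rows : List (List (String × String))) (f : String) :
    (pvScore refs (r :: rows) f).1
      = (if pvVal r f != "" ∧ refs.contains (pvVal r f) = true then 1 else 0) + (pvScore refs rows f).1
    ∧ (pvScore refs (r :: rows) f).2.1
      = (if pvVal r f != "" then 1 else 0) + (pvScore refs rows f).2.1 := by
  by_cases hv : (pvVal r f != "") = true
  · by_cases hm : refs.contains (pvVal r f) = true
    · have hm' : pvVal r f ∈ refs := by simpa using hm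
      simp only [pvScore, List.map_cons, List.filter_cons, hv, hm, if_true, List.length_cons]
      refine ⟨?_, ?_⟩ <;> simp [hv, hm'] <;> push_cast <;> ring
    · have hm' : pvVal r f ∉ refs := by simpa using hm
      simp only [pvScore, List.map_cons, List.filter_cons, hv, if_true, List.length_cons]
      refine ⟨?_, ?_⟩ <;> simp [hv, hm'] <;> push_cast <;> ring
  · simp only [Bool.not_eq_true] at hv
    simp only [pvScore, List.map_cons, List.filter_cons, hv]
    simp [hv]

lemma pv_rows_fold (refs : List String) (cands : List String) (hnd : cands.Nodup) :
    ∀ (rows : List (List (String × String)))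
      (p : PySem.Dict String Int × PySem.Dict String Int) (f : String), f ∈ cands →
    ((rows.foldl (fun p r => cands.foldl (pvInner refs r) p) p).1.getD f 0,
     (rows.foldl (fun p r => cands.foldl (pvInner refs r) p) p).2.getD f 0)
    = (p.1.getD f 0 + (pvScore refs rows f).1, p.2.getD f 0 + (pvScore refs rows f).2.1) := by
  intro rows
  induction rows with
  | nil => intro p f _; simp [pvScore]
  | cons r rows ih =>
    intro p f hf
    simp only [List.foldl_cons]
    rw [ih _ f hf]
    have hi := pv_inner_fold refs r cands p f hnd
    rw [if_pos hf] at hi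
    have h1 := congrArg Prod.fst hi
    have h2 := congrArg Prod.snd hi
    simp only [] at h1 h2
    obtain ⟨hc1, hc2⟩ := pvScore_cons refs r rows f
    rw [hc1, hc2, h1, h2]
    simp only [Prod.mk.injEq]
    refine ⟨by ring, by ring⟩

lemma pv_guard_fold_nodup (c : List String → String → Prop) [∀ a k, Decidable (c a k)] :
    ∀ (keys : List String) (acc : List String), acc.Nodup →
      (∀ a k, c a k → a.contains k = false) →
      (keys.foldl (fun a k => if c a k then a ++ [k] else a) acc).Nodup := by
  intro keys
  induction keys with
  | nil => intro acc h _; simpa using h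
  | cons k t ih =>
    intro acc h hc
    simp only [List.foldl_cons]
    by_cases hk : c acc k
    · simp only [if_pos hk]
      apply ih _ _ hc
      have := hc acc k hk
      simp only [List.contains_eq_mem] at this
      exact List.Nodup.append h (by simp) (by simpa using this)
    · simp only [if_neg hk]
      exact ih _ h hc

lemma pv_filter_fold (P : String → Prop) [DecidablePred P] :
    ∀ (keys acc : List String),
      keys.foldl (fun a k => if P k then a ++ [k] else a) acc
        = acc ++ keys.filter (fun k => decide (P k)) := by
  intro keys
  induction keys with
  | nil => simp
  | cons k t ih =>
    intro acc
    by_cases hk : P k <;> simp [hk, ih]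

lemma pv_candidates_nodup (rows : List (List (String × String)))
    (h : ∀ r ∈ rows, (r.map Prod.fst).Nodup) : (pvCandidateIdFields rows).Nodup := by
  match rows with
  | [] => simp [pvCandidateIdFields]
  | r :: rs =>
    have hk : ((PySem.Dict.mk r).keys).Nodup := by
      rw [PySem.Dict.keys_mk]
      exact h r (by simp)
    unfold pvCandidateIdFields
    apply pv_guard_fold_nodup (c := fun a k => a.contains k = false) _ _
      (pv_guard_fold_nodup (c := fun a k => a.contains k = false ∧ PySem.Str.isIn "id" (PySem.Str.lower k) = true) _ _ ?_ (fun a k hc => hc.1)) (fun a k hc => hc)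
    rw [pv_filter_fold]
    simpa using List.Nodup.filter _ hk

lemma pv_select (key s : String → Int × Int × String)
    (gt : Int × Int × String → Int × Int × String → Bool) :
    ∀ (rest : List String) (b : String), (∀ f ∈ rest, s f = key f) → s b = key b →
      rest.foldl (fun best f => if gt (s f) best then s f else best) (s b) =
      s (rest.foldl (fun best f => if gt (key f) (key best) then f else best) b) := by
  intro rest
  induction rest with
  | nil => intro b _ _; rfl
  | cons f t ih =>
    intro b hrest hb
    have hf : s f = key f := hrest f (by simp)
    simp only [List.foldl_cons]
    rw [← hf, ← hb]
    by_cases hc : gt (s f) (s b) = true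
    · rw [if_pos hc, if_pos hc]
      exact ih f (fun g hg => hrest g (by simp [hg])) hf
    · rw [if_neg hc, if_neg hc]
      exact ih b (fun g hg => hrest g (by simp [hg])) hb

lemma pv_getD_zero_init (cands : List String) (d : PySem.Dict String Int)
    (h : ∀ f, d.getD f 0 = 0) (f : String) :
    (cands.foldl (fun d f => d.insert f 0) d).getD f 0 = 0 := by
  induction cands generalizing d with
  | nil => exact h f
  | cons c t ih =>
    simp only [List.foldl_cons]
    apply ih
    intro g
    rw [PySem.Dict.getD_insert]
    split <;> simp [h]

lemma pvKeyGtB_eq : pvKeyGtB = pvTripleGt := by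
  funext a b
  unfold pvKeyGtB pvTripleGt
  by_cases h1 : a.1 = b.1 <;> by_cases h2 : a.2.1 = b.2.1 <;> simp [h1, h2]

lemma pv_A_eval (r : List (String × String)) (rs : List (List (String × String)))
    (refs : List String) :
    pick_id_field_by_overlap_py (r :: rs) refs =
      match PySem.List.pyGet? (pvCandidateIdFields (r :: rs)) 0 with
      | none => none
      | some c0 =>
        some (((pvCandidateIdFields (r :: rs)).foldl
          (fun best field => if pvTripleGt (pvScore refs (r :: rs) field) best
            then pvScore refs (r :: rs) field else best)
          ((-1 : Int), (-1 : Int), c0)).2.2) := rfl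

lemma pv_B_eval (r : List (String × String)) (rs : List (List (String × String)))
    (refs : List String) :
    pick_id_field_by_overlap_py_alt (r :: rs) refs =
      (let cands := pvCandidateIdFields (r :: rs)
       let z : PySem.Dict String Int := cands.foldl (fun d f => d.insert f 0) PySem.Dict.empty
       let counts := (r :: rs).foldl (fun p row => cands.foldl (pvInner refs row) p) (z, z)
       match cands with
       | [] => none
       | c0 :: rest =>
         some (rest.foldl (fun best f =>
           if pvKeyGtB (counts.1.getD f 0, counts.2.getD f 0, f)
                         (counts.1.getD best 0, counts.2.getD best 0, best)
           then f else best) c0)) := rfl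

set_option maxHeartbeats 1000000 in
-- ===== VERDICT (by name: the statement is the Claim_ definition above) =====
theorem pick_id_field_by_overlap_py_spec : Claim_equal_pick_id_field_by_overlap_py := by
  intro rows refs hdom hpre
  unfold Spec_pick_id_field_by_overlap_py
  match rows, hpre with
  | [], _ => rfl
  | r :: rs, hpre =>
    obtain ⟨hnodups, _⟩ := hpre
    have hnd : (pvCandidateIdFields (r :: rs)).Nodup := pv_candidates_nodup _ hnodups
    rw [pv_A_eval, pv_B_eval]
    rw [pvKeyGtB_eq]
    cases hc : pvCandidateIdFields (r :: rs) with
    | nil => rfl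
    | cons c0 rest =>
      rw [hc] at hnd
      have hget : PySem.List.pyGet? (c0 :: rest) (0 : Int) = some c0 := by
        simp [PySem.List.pyGet?, PySem.List.pyIdx?]
      rw [hget]
      show some (((c0 :: rest).foldl
          (fun best field => if pvTripleGt (pvScore refs (r :: rs) field) best
            then pvScore refs (r :: rs) field else best)
          ((-1 : Int), (-1 : Int), c0)).2.2) =
        some (rest.foldl (fun best f =>
           if pvTripleGt (((r :: rs).foldl (fun p row => (c0 :: rest).foldl (pvInner refs row) p) (((c0 :: rest).foldl (fun d f => d.insert f 0) (PySem.Dict.empty : PySem.Dict String Int)), ((c0 :: rest).foldl (fun d f => d.insert f 0) (PySem.Dict.empty : PySem.Dict String Int)))).1.getD f 0, ((r :: rs).foldl (fun p row => (c0 :: rest).foldl (pvInner refs row) p) (((c0 :: rest).foldl (fun d f => d.insert f 0) (PySem.Dict.empty : PySem.Dict String Int)), ((c0 :: rest).foldl (fun d f => d.insert f 0) (PySem.Dict.empty : PySem.Dict String Int)))).2.getD f 0, f)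
                         (((r :: rs).foldl (fun p row => (c0 :: rest).foldl (pvInner refs row) p) (((c0 :: rest).foldl (fun d f => d.insert f 0) (PySem.Dict.empty : PySem.Dict String Int)), ((c0 :: rest).foldl (fun d f => d.insert f 0) (PySem.Dict.empty : PySem.Dict String Int)))).1.getD best 0, ((r :: rs).foldl (fun p row => (c0 :: rest).foldl (pvInner refs row) p) (((c0 :: rest).foldl (fun d f => d.insert f 0) (PySem.Dict.empty : PySem.Dict String Int)), ((c0 :: rest).foldl (fun d f => d.insert f 0) (PySem.Dict.empty : PySem.Dict String Int)))).2.getD best 0, best)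
           then f else best) c0)
      have hz0 : ∀ g, ((c0 :: rest).foldl (fun d f => d.insert f 0) (PySem.Dict.empty : PySem.Dict String Int)).getD g 0 = 0 :=
        pv_getD_zero_init _ _ (fun g => PySem.Dict.getD_empty g 0)
      have hkey : ∀ f ∈ c0 :: rest, pvScore refs (r :: rs) f =
          (((r :: rs).foldl (fun p row => (c0 :: rest).foldl (pvInner refs row) p) (((c0 :: rest).foldl (fun d f => d.insert f 0) (PySem.Dict.empty : PySem.Dict String Int)), ((c0 :: rest).foldl (fun d f => d.insert f 0) (PySem.Dict.empty : PySem.Dict String Int)))).1.getD f 0, ((r :: rs).foldl (fun p row => (c0 :: rest).foldl (pvInner refs row) p) (((c0 :: rest).foldl (fun d f => d.insert f 0) (PySem.Dict.empty : PySem.Dict String Int)), ((c0 :: rest).foldl (fun d f => d.insert f 0) (PySem.Dict.empty : PySem.Dict String Int)))).2.getD f 0, f) := by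
        intro f hf
        have h := pv_rows_fold refs (c0 :: rest) hnd (r :: rs) (((c0 :: rest).foldl (fun d f => d.insert f 0) (PySem.Dict.empty : PySem.Dict String Int)), ((c0 :: rest).foldl (fun d f => d.insert f 0) (PySem.Dict.empty : PySem.Dict String Int))) f hf
        have h1 := congrArg Prod.fst h
        have h2 := congrArg Prod.snd h
        simp only [hz0, zero_add] at h1 h2
        rw [h1, h2]
        rfl
      have hgt0 : pvTripleGt (pvScore refs (r :: rs) c0) ((-1 : Int), (-1 : Int), c0) = true := by
        have h0 : (0 : Int) ≤ (pvScore refs (r :: rs) c0).1 := by simp [pvScore]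
        simp only [pvTripleGt, Bool.or_eq_true, decide_eq_true_eq]
        exact Or.inl (by omega)
      show some ((rest.foldl
          (fun best field => if pvTripleGt (pvScore refs (r :: rs) field) best
            then pvScore refs (r :: rs) field else best)
          (if pvTripleGt (pvScore refs (r :: rs) c0) ((-1 : Int), (-1 : Int), c0)
            then pvScore refs (r :: rs) c0 else ((-1 : Int), (-1 : Int), c0))).2.2) =
        some (rest.foldl (fun best f =>
           if pvTripleGt (((r :: rs).foldl (fun p row => (c0 :: rest).foldl (pvInner refs row) p) (((c0 :: rest).foldl (fun d f => d.insert f 0) (PySem.Dict.empty : PySem.Dict String Int)), ((c0 :: rest).foldl (fun d f => d.insert f 0) (PySem.Dict.empty : PySem.Dict String Int)))).1.getD f 0, ((r :: rs).foldl (fun p row => (c0 :: rest).foldl (pvInner refs row) p) (((c0 :: rest).foldl (fun d f => d.insert f 0) (PySem.Dict.empty : PySem.Dict String Int)), ((c0 :: rest).foldl (fun d f => d.insert f 0) (PySem.Dict.empty : PySem.Dict String Int)))).2.getD f 0, f)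
                         (((r :: rs).foldl (fun p row => (c0 :: rest).foldl (pvInner refs row) p) (((c0 :: rest).foldl (fun d f => d.insert f 0) (PySem.Dict.empty : PySem.Dict String Int)), ((c0 :: rest).foldl (fun d f => d.insert f 0) (PySem.Dict.empty : PySem.Dict String Int)))).1.getD best 0, ((r :: rs).foldl (fun p row => (c0 :: rest).foldl (pvInner refs row) p) (((c0 :: rest).foldl (fun d f => d.insert f 0) (PySem.Dict.empty : PySem.Dict String Int)), ((c0 :: rest).foldl (fun d f => d.insert f 0) (PySem.Dict.empty : PySem.Dict String Int)))).2.getD best 0, best)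
           then f else best) c0)
      rw [if_pos hgt0]
      rw [pv_select (fun f => (((r :: rs).foldl (fun p row => (c0 :: rest).foldl (pvInner refs row) p) (((c0 :: rest).foldl (fun d f => d.insert f 0) (PySem.Dict.empty : PySem.Dict String Int)), ((c0 :: rest).foldl (fun d f => d.insert f 0) (PySem.Dict.empty : PySem.Dict String Int)))).1.getD f 0, ((r :: rs).foldl (fun p row => (c0 :: rest).foldl (pvInner refs row) p) (((c0 :: rest).foldl (fun d f => d.insert f 0) (PySem.Dict.empty : PySem.Dict String Int)), ((c0 :: rest).foldl (fun d f => d.insert f 0) (PySem.Dict.empty : PySem.Dict String Int)))).2.getD f 0, f))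
        (pvScore refs (r :: rs)) pvTripleGt rest c0
        (fun f hf => hkey f (by simp [hf])) (hkey c0 (by simp))]
      rfl
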